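-- pv_equiv track=rewrite | github.com/caiscoding/CS61A-Spring2022 | labs/lab04/lab04/parsons_probs/line_stepper.py | line_stepper
-- ===== SOURCE A (Python) =====
-- def line_stepper(start, k):
--     """
--     Complete the function line_stepper, which returns the number of ways there are to go from
--     start to 0 on the number line by taking exactly k steps along the number line.
--
--     >>> line_stepper(1, 1)
--     1
--     >>> line_stepper(0, 2)
--     2
--     >>> line_stepper(-3, 3)
--     1
--     >>> line_stepper(3, 5)
--     5
--     """
--     "*** YOUR CODE HERE ***"
--     if k == 0:
--         if start == 0:
--             return 1
--         else:
--             return 0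
--     return line_stepper(start - 1, k - 1) + line_stepper(start + 1, k - 1)
-- ===== SOURCE B (Python) =====
-- def line_stepper(start, k):
--     m = k + start
--     if m % 2 != 0 or m < 0 or m > 2 * k:
--         return 0
--     j = m // 2
--     c = 1
--     for i in range(1, j + 1):
--         c = c * (k - i + 1) // i
--     return c
-- ===== Notes on version B (the rewrite author's own statement) =====
-- stated objective: faster
-- what changed: Replaced the exponential binary recursion with the closed-form binomial coefficient C(k,(k+start)/2) (with parity/range check) computed by a single O(k) multiplicative loop; intended as faster (asymptotic): a timing run saw A time out from n=16 while B returned, measuring 1536x on the single size both finished.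
import Mathlib
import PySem

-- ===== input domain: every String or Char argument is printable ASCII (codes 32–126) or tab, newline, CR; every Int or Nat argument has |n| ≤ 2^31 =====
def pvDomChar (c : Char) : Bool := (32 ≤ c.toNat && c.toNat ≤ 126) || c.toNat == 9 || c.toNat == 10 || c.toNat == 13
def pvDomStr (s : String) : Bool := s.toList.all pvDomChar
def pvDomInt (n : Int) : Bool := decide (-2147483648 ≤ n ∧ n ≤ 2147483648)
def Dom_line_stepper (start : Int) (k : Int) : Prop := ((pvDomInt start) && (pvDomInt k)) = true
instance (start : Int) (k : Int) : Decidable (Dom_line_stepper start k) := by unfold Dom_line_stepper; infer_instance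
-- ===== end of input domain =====

-- B replaces A's exponential two-way recursion by the closed-form binomial coefficient
-- C(k,(k+start)/2) computed with one O(k) multiplicative loop (intended as faster; the timing
-- run saw A time out from n=16 while B returned, 1536x on the one size both finished).


-- ===== PORT A =====
-- A's recursion, with the step count as structural fuel (Pre_ restricts to 0 ≤ k,
-- exactly where Python A terminates; there k.toNat = k and the fuel recursion is A's recursion).
def lineStepperFuel (start : Int) : Nat → Int
  | 0 => if start = 0 then 1 else 0
  | n + 1 => lineStepperFuel (start - 1) n + lineStepperFuel (start + 1) n

def line_stepper (start : Int) (k : Int) : Int := lineStepperFuel start k.toNat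

-- ===== PORT B =====
def line_stepper_alt (start : Int) (k : Int) : Int :=
  let m := k + start
  if PySem.Int.mod m 2 ≠ 0 ∨ m < 0 ∨ m > 2 * k then 0
  else
    let j := PySem.Int.floordiv m 2
    (PySem.List.pyRange 1 (j + 1) 1).foldl
      (fun c i => PySem.Int.floordiv (c * (k - i + 1)) i) 1

-- ===== PRECONDITION & SPEC =====
-- Pre_: Python A terminates exactly when 0 ≤ k (for k < 0 the recursion never reaches
-- its base case and raises RecursionError).
def Pre_line_stepper (start : Int) (k : Int) : Prop := 0 ≤ k
instance (start : Int) (k : Int) : Decidable (Pre_line_stepper start k) := by unfold Pre_line_stepper; infer_instance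
def pvWitness_line_stepper : Int × Int := (1, 1)

def Spec_line_stepper (start : Int) (k : Int) (out : Int) : Prop := out = line_stepper_alt start k
instance (start : Int) (k : Int) (out : Int) : Decidable (Spec_line_stepper start k out) := by unfold Spec_line_stepper; infer_instance

-- ===== CLAIM (what is proved, stated in full; the proofs are below) =====
def Claim_equal_line_stepper : Prop := ∀ (start : Int) (k : Int), Dom_line_stepper start k → Pre_line_stepper start k → Spec_line_stepper start k (line_stepper start k)

-- ===== LEMMAS AND PROOFS =====

-- A's recursion equals the binomial characterisation.
theorem lsFuel_char : ∀ (n : Nat) (s : Int),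
    lineStepperFuel s n =
      if ((n : Int) + s) % 2 = 0 ∧ 0 ≤ (n : Int) + s ∧ (n : Int) + s ≤ 2 * (n : Int)
      then ((n.choose (((n : Int) + s).toNat / 2)) : Int) else 0 := by
  intro n
  induction n with
  | zero =>
    intro s
    simp only [lineStepperFuel, Nat.cast_zero, zero_add]
    by_cases h : s = 0
    · subst h; norm_num
    · rw [if_neg h, if_neg (by omega)]
  | succ n ih =>
    intro s
    have h1 := ih (s - 1)
    have h2 := ih (s + 1)
    simp only [lineStepperFuel, h1, h2]
    push_cast
    by_cases hpar : ((n : Int) + 1 + s) % 2 = 0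
    · by_cases hlo : 0 ≤ (n : Int) + 1 + s
      · by_cases hhi : (n : Int) + 1 + s ≤ 2 * ((n : Int) + 1)
        · -- parity and range hold on the RHS
          by_cases hz : (n : Int) + 1 + s = 0
          · -- M = 0 : only the (s+1) branch contributes
            rw [if_neg (by omega), if_pos (by omega), if_pos (by omega)]
            have e2 : ((n : Int) + (s + 1)).toNat / 2 = 0 := by omega
            have e3 : ((n : Int) + 1 + s).toNat / 2 = 0 := by omega
            simp [e2, e3]
          · by_cases htop : (n : Int) + 1 + s = 2 * (n : Int) + 2
            · -- M = 2n+2 : only the (s-1) branch contributes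
              rw [if_pos (by omega), if_neg (by omega), if_pos (by omega)]
              have e1 : ((n : Int) + (s - 1)).toNat / 2 = n := by omega
              have e3 : ((n : Int) + 1 + s).toNat / 2 = n + 1 := by omega
              simp [e1, e3]
            · -- 2 ≤ M ≤ 2n : both branches contribute, Pascal
              rw [if_pos (by omega), if_pos (by omega), if_pos (by omega)]
              obtain ⟨t, ht⟩ : ∃ t : Nat, ((n : Int) + 1 + s).toNat = 2 * (t + 1) :=
                ⟨((n : Int) + 1 + s).toNat / 2 - 1, by omega⟩
              have e1 : ((n : Int) + (s - 1)).toNat / 2 = t := by omega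
              have e2 : ((n : Int) + (s + 1)).toNat / 2 = t + 1 := by omega
              have e3 : ((n : Int) + 1 + s).toNat / 2 = t + 1 := by omega
              rw [e1, e2, e3, Nat.choose_succ_succ]
              push_cast; ring
        · rw [if_neg (by omega), if_neg (by omega), if_neg (by omega)]; ring
      · rw [if_neg (by omega), if_neg (by omega), if_neg (by omega)]; ring
    · rw [if_neg (by omega), if_neg (by omega), if_neg (by omega)]; ring

-- B's multiplicative loop computes the binomial coefficient.
theorem loop_choose (k : Int) (hk : 0 ≤ k) : ∀ (t : Nat), (t : Int) ≤ k →
    (PySem.List.pyRange 1 ((t : Int) + 1) 1).foldl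
      (fun c i => PySem.Int.floordiv (c * (k - i + 1)) i) 1 = (k.toNat.choose t : Int) := by
  intro t
  induction t with
  | zero =>
    intro _
    rw [PySem.List.pyRange_one_eq_nil (by norm_num)]
    simp
  | succ t ih =>
    intro ht
    have ht' : (t : Int) ≤ k := by push_cast at ht ⊢; omega
    have hsplit := PySem.List.pyRange_one_succ_right (a := 1) (b := (t : Int) + 1) (by omega)
    push_cast
    rw [hsplit, List.foldl_append]
    have hih := ih ht'
    push_cast at hih
    rw [hih]
    simp only [List.foldl]
    have hkn : k = (k.toNat : Int) := by omega
    have htn : t ≤ k.toNat := by omega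
    have e1 : k - ((t : Int) + 1) + 1 = ((k.toNat - t : Nat) : Int) := by omega
    rw [e1, show ((t : Int) + 1) = (((t + 1 : Nat)) : Int) by push_cast; ring,
      ← Nat.cast_mul, PySem.Int.floordiv_natCast]
    have : k.toNat.choose t * (k.toNat - t) = k.toNat.choose (t + 1) * (t + 1) :=
      (Nat.choose_succ_right_eq k.toNat t).symm
    rw [this, Nat.mul_div_cancel _ (Nat.succ_pos t)]

theorem ab_eq (start k : Int) (hk : 0 ≤ k) : line_stepper start k = line_stepper_alt start k := by
  have hkc : ((k.toNat : Int)) = k := by omega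
  unfold line_stepper line_stepper_alt
  rw [lsFuel_char, hkc]
  have hmod : PySem.Int.mod (k + start) 2 = (k + start) % 2 :=
    PySem.Int.mod_eq_emod_of_pos (by norm_num)
  by_cases hc : (k + start) % 2 = 0 ∧ 0 ≤ k + start ∧ k + start ≤ 2 * k
  · rw [if_pos hc, if_neg (by rw [hmod]; omega)]
    have hj : PySem.Int.floordiv (k + start) 2 = (((k + start).toNat / 2 : Nat) : Int) := by
      rw [PySem.Int.floordiv_eq_ediv_of_pos (by norm_num)]; omega
    rw [hj, loop_choose k hk ((k + start).toNat / 2) (by omega)]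
  · rw [if_neg hc, if_pos (by rw [hmod]; omega)]

-- ===== VERDICT (by name: the statement is the Claim_ definition above) =====
theorem line_stepper_spec : Claim_equal_line_stepper := by
  intro start k _ hpre
  unfold Spec_line_stepper
  exact ab_eq start k hpre
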